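-- pv_equiv track=rewrite | github.com/belodpav/algoproblems | algorithms/strings/rabin-karp/rabin-karp.py | getHashes
-- ===== SOURCE A (Python) =====
-- def getHashes(t, p):
--     h = []
--     l = len(t)
--     for i in range(l):
--         h.append((ord(t[i]) - ord('a') + 1) * p[i])
--         if i != 0:
--             h[i] += h[i - 1]
--     return h
-- ===== SOURCE B (Python) =====
-- def getHashes(t, p):
--     n = len(t)
--     if n == 0:
--         return []
--     if n == 1:
--         return [(ord(t[0]) - ord('a') + 1) * p[0]]
--     m = n // 2
--     left = getHashes(t[:m], p[:m])
--     right = getHashes(t[m:], p[m:])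
--     s = left[-1]
--     return left + [s + x for x in right]
-- ===== Notes on version B (the rewrite author's own statement) =====
-- stated objective: alternative
-- what changed: B computes the prefix hashes by divide and conquer: it splits the string in half, recursively hashes each half, and shifts the right half's prefix sums by the left half's total, instead of A's single left-to-right loop carrying a running sum via h[i-1].
import Mathlib
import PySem

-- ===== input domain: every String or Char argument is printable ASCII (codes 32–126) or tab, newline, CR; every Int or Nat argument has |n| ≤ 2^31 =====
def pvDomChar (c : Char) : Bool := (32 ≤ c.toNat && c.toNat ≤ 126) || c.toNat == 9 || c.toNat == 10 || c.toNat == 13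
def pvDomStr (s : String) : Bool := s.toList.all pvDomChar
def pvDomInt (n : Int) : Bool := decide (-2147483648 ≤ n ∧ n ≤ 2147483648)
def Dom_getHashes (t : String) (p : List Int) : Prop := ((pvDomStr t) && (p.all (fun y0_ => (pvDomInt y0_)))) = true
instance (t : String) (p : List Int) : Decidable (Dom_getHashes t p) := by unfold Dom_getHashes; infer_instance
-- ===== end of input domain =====

-- B computes the prefix hashes by divide and conquer (hash each half, shift the right
-- half by the left half's total) instead of A's single running-sum loop (alternative
-- algorithm; not claimed faster).

-- ===== PORT A =====
-- A: one loop that appends (ord(t[i])-ord('a')+1)*p[i] and then adds h[i-1] into h[i].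
-- List.getD is used for t[i]/p[i]; under Pre_ every index is in range, so no default fires.
def getHashes (t : String) (p : List Int) : List Int :=
  (List.range t.toList.length).foldl
    (fun h i =>
      let h := h ++ [(((t.toList.getD i ' ').toNat : Int) - 97 + 1) * p.getD i 0]
      if i ≠ 0 then h.set i (h.getD i 0 + h.getD (i - 1) 0) else h)
    []

-- ===== PORT B =====
-- B: divide and conquer over the characters; t[:m]/p[:m] and t[m:]/p[m:] are
-- List.take/List.drop (exact for 0 ≤ m); t[0]/p[0]/left[-1] via getD — under Pre_
-- they are always in range (left is nonempty in the recursive branch since m ≥ 1).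
def pvGoB (cs : List Char) (p : List Int) : List Int :=
  if cs.length = 0 then []
  else if cs.length = 1 then [(((cs.getD 0 ' ').toNat : Int) - 97 + 1) * p.getD 0 0]
  else
    let m := cs.length / 2
    let left := pvGoB (cs.take m) (p.take m)
    let right := pvGoB (cs.drop m) (p.drop m)
    let s := left.getD (left.length - 1) 0
    left ++ right.map (fun x => s + x)
termination_by cs.length
decreasing_by
  · simp only [List.length_take]; omega
  · simp only [List.length_drop]; omega

def getHashes_alt (t : String) (p : List Int) : List Int :=
  pvGoB t.toList p

-- ===== PRECONDITION & SPEC =====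
-- Python A raises IndexError on p[i] when len(p) < len(t); exactly those inputs are excluded.
def Pre_getHashes (t : String) (p : List Int) : Prop := t.toList.length ≤ p.length
instance (t : String) (p : List Int) : Decidable (Pre_getHashes t p) := by unfold Pre_getHashes; infer_instance
def pvWitness_getHashes : String × List Int := ("abc", [1, 2, 3])

def Spec_getHashes (t : String) (p : List Int) (out : List Int) : Prop := out = getHashes_alt t p
instance (t : String) (p : List Int) (out : List Int) : Decidable (Spec_getHashes t p out) := by unfold Spec_getHashes; infer_instance

-- ===== CLAIM (what is proved, stated in full; the proofs are below) =====
def Claim_equal_getHashes : Prop := ∀ (t : String) (p : List Int), Dom_getHashes t p → Pre_getHashes t p → Spec_getHashes t p (getHashes t p)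

-- ===== LEMMAS AND PROOFS =====

-- prefix sums of l starting from accumulator a
def pvPS (a : Int) : List Int → List Int
  | [] => []
  | x :: xs => (a + x) :: pvPS (a + x) xs

-- the per-index weighted value list both programs prefix-sum
def pvVals (cs : List Char) (p : List Int) : List Int :=
  (List.range cs.length).map (fun i => (((cs.getD i ' ').toNat : Int) - 97 + 1) * p.getD i 0)

theorem pvPS_length (a : Int) (l : List Int) : (pvPS a l).length = l.length := by
  induction l generalizing a with
  | nil => rfl
  | cons x xs ih => simp [pvPS, ih]

theorem pvPS_append (l₁ l₂ : List Int) (a : Int) :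
    pvPS a (l₁ ++ l₂) = pvPS a l₁ ++ pvPS (a + l₁.sum) l₂ := by
  induction l₁ generalizing a with
  | nil => simp [pvPS]
  | cons y ys ih => simp [pvPS, ih, add_assoc]

theorem pvPS_append_one (l : List Int) (a x : Int) :
    pvPS a (l ++ [x]) = pvPS a l ++ [(a + l.sum) + x] := by
  rw [pvPS_append]; simp [pvPS]

theorem pvPS_last (l : List Int) (a : Int) (h : l ≠ []) :
    (pvPS a l).getD (l.length - 1) 0 = a + l.sum := by
  induction l generalizing a with
  | nil => simp at h
  | cons y ys ih =>
    cases ys with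
    | nil => simp [pvPS]
    | cons z zs =>
      have := ih (a + y) (by simp)
      simp only [pvPS, List.sum_cons, add_assoc] at this ⊢
      simp only [List.length_cons] at this
      simpa using this

theorem pvPS_map_add (l : List Int) (a b : Int) :
    (pvPS b l).map (fun x => a + x) = pvPS (a + b) l := by
  induction l generalizing b with
  | nil => rfl
  | cons x xs ih => simp [pvPS, ih, add_assoc]

theorem pv_set_append (h : List Int) (x y : Int) (k : Nat) (hk : k = h.length) :
    (h ++ [x]).set k y = h ++ [y] := by
  subst hk
  induction h with
  | nil => rfl
  | cons a h ih => simp [ih]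

theorem pv_getD_append_len (h : List Int) (x : Int) (k : Nat) (hk : k = h.length) :
    (h ++ [x]).getD k 0 = x := by
  subst hk
  induction h with
  | nil => rfl
  | cons a h ih => simpa using ih

theorem pv_getD_append_lt (h : List Int) (x : Int) (k : Nat) (hk : k < h.length) :
    (h ++ [x]).getD k 0 = h.getD k 0 := by
  simp [List.getD, List.getElem?_append_left hk]

-- A's loop over range n produces the prefix sums of the first n values
theorem pvA_fold (v : Nat → Int) (n : Nat) :
    (List.range n).foldl
      (fun h i =>
        let h := h ++ [v i]
        if i ≠ 0 then h.set i (h.getD i 0 + h.getD (i - 1) 0) else h)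
      []
    = pvPS 0 ((List.range n).map v) := by
  induction n with
  | zero => rfl
  | succ n ih =>
    rw [List.range_succ, List.foldl_append, ih, List.map_append]
    simp only [List.foldl_cons, List.foldl_nil, List.map_cons, List.map_nil]
    by_cases hn : n = 0
    · subst hn; simp [pvPS]
    · have hlen : (pvPS 0 ((List.range n).map v)).length = n := by
        simp [pvPS_length]
      have hne : (List.range n).map v ≠ [] := by
        simp [List.map_eq_nil_iff, List.range_eq_nil, hn]
      rw [if_pos hn,
        pv_getD_append_len _ _ _ hlen.symm,
        pv_getD_append_lt _ _ _ (by omega),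
        pv_set_append _ _ _ _ hlen.symm,
        pvPS_append_one]
      have hlast := pvPS_last ((List.range n).map v) 0 hne
      simp only [List.length_map, List.length_range] at hlast
      rw [hlast]
      ring_nf

-- taking the first m entries of the value list
theorem pvVals_take (cs : List Char) (p : List Int) (m : Nat) (hm : m ≤ cs.length) :
    pvVals (cs.take m) (p.take m)
      = (List.range m).map (fun i => (((cs.getD i ' ').toNat : Int) - 97 + 1) * p.getD i 0) := by
  unfold pvVals
  rw [List.length_take, Nat.min_eq_left hm]
  refine List.map_congr_left (fun i hi => ?_)
  rw [List.mem_range] at hi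
  simp [List.getD, hi]

-- dropping the first m entries of the value list
theorem pvVals_drop (cs : List Char) (p : List Int) (m : Nat) :
    pvVals (cs.drop m) (p.drop m)
      = (List.range (cs.length - m)).map
          (fun i => (((cs.getD (m + i) ' ').toNat : Int) - 97 + 1) * p.getD (m + i) 0) := by
  unfold pvVals
  rw [List.length_drop]
  refine List.map_congr_left (fun i _ => ?_)
  simp [List.getD, List.getElem?_drop]

-- splitting a range-map at m
theorem pv_range_map_split {α : Type} (f : Nat → α) (n m : Nat) (hm : m ≤ n) :
    (List.range n).map f
      = (List.range m).map f ++ (List.range (n - m)).map (fun i => f (m + i)) := by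
  conv_lhs => rw [show n = m + (n - m) by omega]
  rw [List.range_add, List.map_append, List.map_map]
  rfl

-- B's divide and conquer produces the prefix sums of the value list
theorem pvGoB_eq (cs : List Char) (p : List Int) :
    pvGoB cs p = pvPS 0 (pvVals cs p) := by
  induction cs, p using pvGoB.induct with
  | case1 cs p h0 =>
    rw [pvGoB]
    simp [pvPS, pvVals, h0]
  | case2 cs p h0 h1 =>
    rw [pvGoB]
    simp [h1, pvVals, pvPS]
  | case3 cs p h0 h1 m ihl ihr =>
    have hmdef : m = cs.length / 2 := rfl
    have hn : 2 ≤ cs.length := by omega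
    have hm1 : 1 ≤ m := by rw [hmdef]; omega
    have hmn : m ≤ cs.length := by rw [hmdef]; omega
    rw [pvGoB]
    simp only [if_neg h0, if_neg h1]
    show (pvGoB (List.take m cs) (List.take m p))
        ++ (pvGoB (List.drop m cs) (List.drop m p)).map
            (fun x => (pvGoB (List.take m cs) (List.take m p)).getD
              ((pvGoB (List.take m cs) (List.take m p)).length - 1) 0 + x)
      = pvPS 0 (pvVals cs p)
    rw [ihl, ihr]
    have hV1 : pvVals (List.take m cs) (List.take m p)
        = (List.range m).map
            (fun i => (((cs.getD i ' ').toNat : Int) - 97 + 1) * p.getD i 0) :=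
      pvVals_take cs p m hmn
    have hV2 : pvVals (List.drop m cs) (List.drop m p)
        = (List.range (cs.length - m)).map
            (fun i => (((cs.getD (m + i) ' ').toNat : Int) - 97 + 1) * p.getD (m + i) 0) :=
      pvVals_drop cs p m
    have hVne : pvVals (List.take m cs) (List.take m p) ≠ [] := by
      rw [hV1]
      simp [List.range_eq_nil]
      omega
    have hlast := pvPS_last (pvVals (List.take m cs) (List.take m p)) 0 hVne
    rw [pvPS_length, hlast, zero_add, pvPS_map_add, add_zero]
    have hsplit : pvVals cs p
        = (List.range m).map
            (fun i => (((cs.getD i ' ').toNat : Int) - 97 + 1) * p.getD i 0)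
          ++ (List.range (cs.length - m)).map
            (fun i => (fun j => (((cs.getD j ' ').toNat : Int) - 97 + 1) * p.getD j 0) (m + i)) := by
      unfold pvVals
      exact pv_range_map_split _ cs.length m hmn
    rw [hsplit, pvPS_append, zero_add, hV1, hV2]

-- ===== VERDICT (by name: the statement is the Claim_ definition above) =====
theorem getHashes_spec : Claim_equal_getHashes := by
  intro t p _ _
  unfold Spec_getHashes getHashes getHashes_alt
  rw [pvA_fold, pvGoB_eq]
  rfl
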